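-- pv_equiv track=rewrite | github.com/klknet/geeks4geeks | algorithm/bitwise/find_ele_only_once.py | find_once
-- ===== SOURCE A (Python) =====
-- def find_once(arr):
--     int_size = 32
--     res = 0
--     for i in range(int_size):
--         s = 0
--         x = 1 << i
--         for j in arr:
--             if j & x:
--                 s += 1
--         if s % 3 != 0:
--             res |= x
--     return res
-- ===== SOURCE B (Python) =====
-- def find_once(arr):
--     # Single pass: 'ones' holds the bits seen a number of times ≡ 1 (mod 3),
--     # 'twos' the bits seen ≡ 2 (mod 3), working in the 32-bit space.
--     MASK = 0xFFFFFFFF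
--     ones = 0
--     twos = 0
--     for j in arr:
--         v = j & MASK
--         ones = (ones ^ v) & (MASK ^ twos)
--         twos = (twos ^ v) & (MASK ^ ones)
--     return ones | twos
-- ===== Notes on version B (the rewrite author's own statement) =====
-- stated objective: faster
-- what changed: Replaces A's 32 per-bit counting passes over the list with the classic single-pass ones/twos bitmask accumulator (bits seen 1 resp. 2 times mod 3), masked to the 32-bit space, returning ones|twos.
import Mathlib
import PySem

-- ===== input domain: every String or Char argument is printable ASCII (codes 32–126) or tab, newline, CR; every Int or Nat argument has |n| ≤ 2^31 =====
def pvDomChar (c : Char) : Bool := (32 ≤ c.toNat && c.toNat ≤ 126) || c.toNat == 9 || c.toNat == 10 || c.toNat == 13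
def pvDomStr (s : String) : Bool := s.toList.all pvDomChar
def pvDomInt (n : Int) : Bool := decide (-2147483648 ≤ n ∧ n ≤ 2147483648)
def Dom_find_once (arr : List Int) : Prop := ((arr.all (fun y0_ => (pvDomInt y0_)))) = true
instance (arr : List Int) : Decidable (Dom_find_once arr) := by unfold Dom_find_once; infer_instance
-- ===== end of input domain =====

-- B replaces A's 32 per-bit counting passes by one ones/twos bitmask pass over the list.

-- ===== PORT A =====
-- the inner loop of A: count the elements j with j & x ≠ 0
def find_once_count (arr : List Int) (x : Int) : Int :=
  arr.foldl (fun s j => if PySem.Int.band j x ≠ 0 then s + 1 else s) 0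

-- the body of A's outer loop: or x into res if that count % 3 ≠ 0
def find_once_step (arr : List Int) (res : Int) (i : Int) : Int :=
  -- x = 1 << i ; i comes from range(32), so i.toNat is Python's shift count exactly
  let x : Int := (1:Int) <<< i.toNat
  let s : Int := find_once_count arr x
  if PySem.Int.mod s 3 ≠ 0 then PySem.Int.bor res x else res

def find_once (arr : List Int) : Int :=
  (PySem.List.pyRange 0 32 1).foldl (find_once_step arr) 0

-- ===== PORT B =====
-- the body of B's single loop: ones/twos hold the bits seen ≡1 / ≡2 (mod 3) within 32 bits
def find_once_alt_step (st : Int × Int) (j : Int) : Int × Int :=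
  let v := PySem.Int.band j 4294967295
  let o := PySem.Int.band (PySem.Int.bxor st.1 v) (PySem.Int.bxor 4294967295 st.2)
  let t := PySem.Int.band (PySem.Int.bxor st.2 v) (PySem.Int.bxor 4294967295 o)
  (o, t)

def find_once_alt (arr : List Int) : Int :=
  let st := arr.foldl find_once_alt_step ((0:Int), (0:Int))
  PySem.Int.bor st.1 st.2

-- ===== PRECONDITION & SPEC =====
def Spec_find_once (arr : List Int) (out : Int) : Prop := out = find_once_alt arr
instance (arr : List Int) (out : Int) : Decidable (Spec_find_once arr out) := by unfold Spec_find_once; infer_instance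

-- ===== CLAIM =====
def Claim_equal_find_once : Prop := ∀ (arr : List Int), Dom_find_once arr → Spec_find_once arr (find_once arr)

-- ===== LEMMAS AND PROOFS =====

-- number of elements of arr with two's-complement bit k set (Python's per-bit count)
def bitcnt (arr : List Int) (k : Nat) : Nat := arr.countP (fun j => j.testBit k)

theorem tb_coe (n : Nat) (i : Nat) : ((n : Int)).testBit i = n.testBit i := rfl

theorem tb_negSucc (m : Nat) (i : Nat) : (Int.negSucc m).testBit i = !m.testBit i := rfl

theorem neg_eq_negSucc (a : Int) (h : a < 0) : a = Int.negSucc (-a - 1).toNat := by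
  rw [Int.negSucc_eq, Int.toNat_of_nonneg (by omega)]; omega

theorem negSucc_eq' (k : Nat) : (-(k : Int) - 1) = Int.negSucc k := by
  rw [Int.negSucc_eq]; ring

theorem tb_nonneg (a : Int) (h : 0 ≤ a) (i : Nat) : a.testBit i = a.toNat.testBit i := by
  obtain ⟨m, rfl⟩ := Int.eq_ofNat_of_zero_le h; rfl

theorem tb_neg (a : Int) (h : ¬ 0 ≤ a) (i : Nat) : a.testBit i = !((-a - 1).toNat.testBit i) := by
  conv_lhs => rw [neg_eq_negSucc a (by omega)]
  rw [tb_negSucc]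

-- two Ints with the same two's-complement bits are equal
theorem intExt {a b : Int} (h : ∀ i, a.testBit i = b.testBit i) : a = b := by
  cases a with
  | ofNat m =>
    cases b with
    | ofNat n =>
      congr 1
      exact Nat.eq_of_testBit_eq fun i => h i
    | negSucc n =>
      exfalso
      have hm : m.testBit (m + n) = false :=
        Nat.testBit_lt_two_pow (lt_of_lt_of_le Nat.lt_two_pow_self (Nat.pow_le_pow_right (by omega) (by omega)))
      have hn : n.testBit (m + n) = false :=
        Nat.testBit_lt_two_pow (lt_of_lt_of_le Nat.lt_two_pow_self (Nat.pow_le_pow_right (by omega) (by omega)))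
      have := h (m + n)
      simp [Int.testBit, hm, hn] at this
  | negSucc m =>
    cases b with
    | ofNat n =>
      exfalso
      have hm : m.testBit (m + n) = false :=
        Nat.testBit_lt_two_pow (lt_of_lt_of_le Nat.lt_two_pow_self (Nat.pow_le_pow_right (by omega) (by omega)))
      have hn : n.testBit (m + n) = false :=
        Nat.testBit_lt_two_pow (lt_of_lt_of_le Nat.lt_two_pow_self (Nat.pow_le_pow_right (by omega) (by omega)))
      have := h (m + n)
      simp [Int.testBit, hm, hn] at this
    | negSucc n =>
      congr 1
      refine Nat.eq_of_testBit_eq fun i => ?_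
      have := h i
      simp [Int.testBit] at this
      exact this

-- a + b = a ||| b when the bits are disjoint
theorem addOr : ∀ a b : Nat, a &&& b = 0 → a + b = a ||| b := by
  intro a
  induction a using Nat.strong_induction_on with
  | _ a ih =>
    intro b h
    rcases Nat.eq_zero_or_pos a with ha | ha
    · simp [ha]
    · have h2 : a / 2 &&& b / 2 = 0 := by
        rw [← Nat.and_div_two, h]
      have ihh := ih (a / 2) (Nat.div_lt_self ha (by omega)) (b / 2) h2
      have hpar : ¬(a % 2 = 1 ∧ b % 2 = 1) := by
        intro ⟨h1, h2'⟩
        have := Nat.and_mod_two_eq_one.mpr ⟨h1, h2'⟩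
        rw [h] at this
        simp at this
      have hor2 : (a ||| b) / 2 = a / 2 ||| b / 2 := Nat.or_div_two
      have hb0 : (a ||| b).testBit 0 = (a.testBit 0 || b.testBit 0) := Nat.testBit_or a b 0
      simp only [Nat.testBit_zero] at hb0
      have hoor := Nat.mod_two_eq_zero_or_one (a ||| b)
      have ha2 := Nat.mod_two_eq_zero_or_one a
      have hb2 := Nat.mod_two_eq_zero_or_one b
      have hoa := Nat.div_add_mod a 2
      have hob := Nat.div_add_mod b 2
      have hoo := Nat.div_add_mod (a ||| b) 2
      have hb0' : ((a ||| b) % 2 = 1) ↔ (a % 2 = 1 ∨ b % 2 = 1) := by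
        simpa using hb0
      omega

theorem subtb (n m i : Nat) : (n - (n &&& m)).testBit i = (n.testBit i && !(m.testBit i)) := by
  have hd : (n ^^^ (n &&& m)) &&& (n &&& m) = 0 := by
    refine Nat.eq_of_testBit_eq fun k => ?_
    simp [Nat.testBit_and, Nat.testBit_xor]
    cases n.testBit k <;> cases m.testBit k <;> simp
  have hsum : (n ^^^ (n &&& m)) + (n &&& m) = n := by
    rw [addOr _ _ hd]
    refine Nat.eq_of_testBit_eq fun k => ?_
    simp [Nat.testBit_or, Nat.testBit_xor, Nat.testBit_and]
    cases n.testBit k <;> cases m.testBit k <;> simp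
  have he : n - (n &&& m) = n ^^^ (n &&& m) := by omega
  rw [he]
  simp only [Nat.testBit_xor, Nat.testBit_and]
  cases n.testBit i <;> cases m.testBit i <;> simp

theorem band_tb (a b : Int) (i : Nat) :
    (PySem.Int.band a b).testBit i = (a.testBit i && b.testBit i) := by
  unfold PySem.Int.band
  by_cases ha : 0 ≤ a <;> by_cases hb : 0 ≤ b <;> simp only [ha, hb, if_true, if_false]
  · rw [tb_coe, Nat.testBit_and, tb_nonneg a ha, tb_nonneg b hb]
  · rw [tb_coe, subtb, tb_nonneg a ha, tb_neg b hb]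
  · rw [tb_coe, subtb, tb_nonneg b hb, tb_neg a ha, Bool.and_comm]
  · rw [negSucc_eq', tb_negSucc, Nat.testBit_or, tb_neg a ha, tb_neg b hb, Bool.not_or]

theorem bor_tb (a b : Int) (i : Nat) :
    (PySem.Int.bor a b).testBit i = (a.testBit i || b.testBit i) := by
  unfold PySem.Int.bor
  by_cases ha : 0 ≤ a <;> by_cases hb : 0 ≤ b <;> simp only [ha, hb, if_true, if_false]
  · rw [tb_coe, Nat.testBit_or, tb_nonneg a ha, tb_nonneg b hb]
  · rw [negSucc_eq', tb_negSucc, subtb, tb_nonneg a ha, tb_neg b hb]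
    cases a.toNat.testBit i <;> cases ((-b - 1).toNat).testBit i <;> rfl
  · rw [negSucc_eq', tb_negSucc, subtb, tb_nonneg b hb, tb_neg a ha]
    cases b.toNat.testBit i <;> cases ((-a - 1).toNat).testBit i <;> rfl
  · rw [negSucc_eq', tb_negSucc, Nat.testBit_and, tb_neg a ha, tb_neg b hb, Bool.not_and]

theorem bxor_tb (a b : Int) (i : Nat) :
    (PySem.Int.bxor a b).testBit i = ((a.testBit i).xor (b.testBit i)) := by
  unfold PySem.Int.bxor
  by_cases ha : 0 ≤ a <;> by_cases hb : 0 ≤ b <;> simp only [ha, hb, if_true, if_false]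
  · rw [tb_coe, Nat.testBit_xor, tb_nonneg a ha, tb_nonneg b hb]
  · rw [negSucc_eq', tb_negSucc, Nat.testBit_xor, tb_nonneg a ha, tb_neg b hb]
    cases a.toNat.testBit i <;> cases ((-b - 1).toNat).testBit i <;> rfl
  · rw [negSucc_eq', tb_negSucc, Nat.testBit_xor, tb_nonneg b hb, tb_neg a ha]
    cases b.toNat.testBit i <;> cases ((-a - 1).toNat).testBit i <;> rfl
  · rw [tb_coe, Nat.testBit_xor, tb_neg a ha, tb_neg b hb]
    cases ((-a - 1).toNat).testBit i <;> cases ((-b - 1).toNat).testBit i <;> rfl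

theorem one_shl_tb (n k : Nat) : ((1:Int) <<< n).testBit k = decide (n = k) := by
  rw [show ((1:Int) <<< n) = Int.ofNat (1 <<< n) from rfl]
  show (1 <<< n : Nat).testBit k = decide (n = k)
  rw [Nat.shiftLeft_eq, one_mul, Nat.testBit_two_pow]

theorem zero_tb (k : Nat) : (0 : Int).testBit k = false := Nat.zero_testBit k

theorem eq_zero_iff_tb (a : Int) : a = 0 ↔ ∀ k, a.testBit k = false := by
  constructor
  · rintro rfl k; exact zero_tb k
  · intro h; exact intExt fun i => by rw [h i, zero_tb]

theorem band_pow_ne_zero_iff (j : Int) (n : Nat) :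
    (PySem.Int.band j ((1:Int) <<< n) ≠ 0) ↔ j.testBit n = true := by
  constructor
  · intro h
    by_contra hb
    exact h ((eq_zero_iff_tb _).mpr fun k => by
      rw [band_tb, one_shl_tb]
      by_cases hk : n = k
      · subst hk; simp_all
      · simp [hk])
  · intro h h0
    have := ((eq_zero_iff_tb _).mp h0) n
    rw [band_tb, one_shl_tb, h] at this
    simp at this

theorem mask_tb (k : Nat) : (4294967295 : Int).testBit k = decide (k < 32) := by
  rw [show (4294967295 : Int) = Int.ofNat 4294967295 from rfl]
  show (4294967295 : Nat).testBit k = decide (k < 32)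
  rw [show (4294967295 : Nat) = 2 ^ 32 - 1 from rfl, Nat.testBit_two_pow_sub_one]

theorem bitcnt_cons (j : Int) (arr : List Int) (k : Nat) :
    bitcnt (j :: arr) k = (if j.testBit k then 1 else 0) + bitcnt arr k := by
  unfold bitcnt
  rw [List.countP_cons]
  by_cases h : j.testBit k <;> simp [h] <;> omega

-- A's inner loop counts the elements with bit n set
theorem inner_count (arr : List Int) (n : Nat) :
    find_once_count arr ((1:Int) <<< n) = (bitcnt arr n : Int) := by
  unfold find_once_count
  have h := PySem.List.foldl_count_if (fun j => decide (PySem.Int.band j ((1:Int) <<< n) ≠ 0)) arr 0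
  simp only [decide_eq_true_eq] at h
  rw [h, zero_add]
  congr 1
  unfold bitcnt
  refine List.countP_congr fun j _ => ?_
  simp [band_pow_ne_zero_iff]

-- A's step in closed form
theorem step_eq (arr : List Int) (res : Int) (i : Int) :
    find_once_step arr res i
      = if decide (bitcnt arr i.toNat % 3 ≠ 0) then PySem.Int.bor res ((1:Int) <<< i.toNat) else res := by
  unfold find_once_step
  show (if PySem.Int.mod (find_once_count arr ((1:Int) <<< i.toNat)) 3 ≠ 0
      then PySem.Int.bor res ((1:Int) <<< i.toNat) else res) = _
  rw [inner_count]
  have hmod : PySem.Int.mod ((bitcnt arr i.toNat : Nat) : Int) 3 = ((bitcnt arr i.toNat % 3 : Nat) : Int) := by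
    exact_mod_cast PySem.Int.mod_natCast (bitcnt arr i.toNat) 3
  rw [hmod]
  by_cases h : bitcnt arr i.toNat % 3 = 0
  · have h1 : ¬ ((bitcnt arr i.toNat % 3 : Nat) : Int) ≠ 0 := by simp [h]
    rw [if_neg h1, if_neg (by simp [h])]
  · have h1 : ((bitcnt arr i.toNat % 3 : Nat) : Int) ≠ 0 := by exact_mod_cast h
    rw [if_pos h1, if_pos (by simpa using h)]

-- A's outer loop over any list of nonnegative indices
theorem tbFoldA (arr : List Int) :
    ∀ (L : List Int), (∀ i ∈ L, 0 ≤ i) → ∀ (res : Int) (k : Nat),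
      (L.foldl (find_once_step arr) res).testBit k
        = (res.testBit k || (decide ((k : Int) ∈ L) && decide (bitcnt arr k % 3 ≠ 0))) := by
  intro L
  induction L with
  | nil => intro _ res k; simp
  | cons i L ih =>
    intro hL res k
    have hi : 0 ≤ i := hL i (List.mem_cons_self ..)
    rw [List.foldl_cons, ih (fun x hx => hL x (List.mem_cons_of_mem _ hx)), step_eq]
    have htb : (if decide (bitcnt arr i.toNat % 3 ≠ 0) then PySem.Int.bor res ((1:Int) <<< i.toNat) else res).testBit k
        = (res.testBit k || (decide (i.toNat = k) && decide (bitcnt arr i.toNat % 3 ≠ 0))) := by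
      by_cases hc : bitcnt arr i.toNat % 3 ≠ 0
      · rw [if_pos (by simpa using hc), bor_tb, one_shl_tb]
        simp [hc]
      · rw [if_neg (by simpa using hc)]
        simp [hc]
    rw [htb]
    by_cases hk : (k : Int) = i
    · have hk' : i.toNat = k := by omega
      subst hk'
      simp only [List.mem_cons, hk]
      cases hres : res.testBit i.toNat <;>
        cases hc : decide (bitcnt arr i.toNat % 3 ≠ 0) <;>
        cases hd : decide ((i : Int) ∈ L) <;> simp
    · have hk' : ¬ (i.toNat = k) := by omega
      simp [hk, hk', List.mem_cons]

-- characterization of A: bit k of the result is set iff k < 32 and the count is not ≡ 0 (mod 3)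
theorem A_tb (arr : List Int) (k : Nat) :
    (find_once arr).testBit k = (decide (k < 32) && decide (bitcnt arr k % 3 ≠ 0)) := by
  unfold find_once
  rw [tbFoldA arr _ (fun i hi => ((PySem.List.mem_pyRange_one).mp hi).1) 0 k, zero_tb, Bool.false_or]
  congr 1
  rw [decide_eq_decide]
  rw [PySem.List.mem_pyRange_one]
  omega

-- B's loop invariant: ones/twos hold, per bit below 32, whether the running count is ≡ 1 / ≡ 2 (mod 3)
theorem B_fold (arr : List Int) :
    ∀ (o t : Int) (f : Nat → Nat),
      (∀ k, o.testBit k = (decide (k < 32) && decide (f k % 3 = 1))) →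
      (∀ k, t.testBit k = (decide (k < 32) && decide (f k % 3 = 2))) →
      (∀ k, (arr.foldl find_once_alt_step (o, t)).1.testBit k
        = (decide (k < 32) && decide ((f k + bitcnt arr k) % 3 = 1))) ∧
      (∀ k, (arr.foldl find_once_alt_step (o, t)).2.testBit k
        = (decide (k < 32) && decide ((f k + bitcnt arr k) % 3 = 2))) := by
  induction arr with
  | nil =>
    intro o t f ho ht
    refine ⟨fun k => ?_, fun k => ?_⟩ <;>
      simp only [List.foldl_nil, bitcnt, List.countP_nil, Nat.add_zero]
    · exact ho k
    · exact ht k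
  | cons j arr ih =>
    intro o t f ho ht
    simp only [List.foldl_cons]
    rcases hstep : find_once_alt_step (o, t) j with ⟨o', t'⟩
    have hunf : o' = PySem.Int.band (PySem.Int.bxor o (PySem.Int.band j 4294967295))
        (PySem.Int.bxor 4294967295 t) ∧
        t' = PySem.Int.band (PySem.Int.bxor t (PySem.Int.band j 4294967295))
        (PySem.Int.bxor 4294967295
          (PySem.Int.band (PySem.Int.bxor o (PySem.Int.band j 4294967295))
            (PySem.Int.bxor 4294967295 t))) := by
      unfold find_once_alt_step at hstep
      simp only [Prod.mk.injEq] at hstep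
      exact ⟨hstep.1.symm, hstep.2.symm⟩
    have ho' : ∀ k, o'.testBit k
        = (decide (k < 32) && decide ((f k + (if j.testBit k then 1 else 0)) % 3 = 1)) := by
      intro k
      rw [hunf.1, band_tb, bxor_tb, bxor_tb, band_tb, mask_tb, ho k, ht k]
      by_cases hk : k < 32
      · simp only [hk, decide_true, Bool.true_and, Bool.and_true]
        cases hb : j.testBit k <;>
          rcases (by omega : f k % 3 = 0 ∨ f k % 3 = 1 ∨ f k % 3 = 2) with h | h | h <;>
          simp [h, Nat.add_mod]
      · simp [hk]
    have ht' : ∀ k, t'.testBit k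
        = (decide (k < 32) && decide ((f k + (if j.testBit k then 1 else 0)) % 3 = 2)) := by
      intro k
      have h1 := ho' k
      rw [hunf.1] at h1
      rw [hunf.2, band_tb, bxor_tb, bxor_tb, h1, band_tb, mask_tb, ht k]
      by_cases hk : k < 32
      · simp only [hk, decide_true, Bool.true_and, Bool.and_true]
        cases hb : j.testBit k <;>
          rcases (by omega : f k % 3 = 0 ∨ f k % 3 = 1 ∨ f k % 3 = 2) with h | h | h <;>
          simp [h, Nat.add_mod]
      · simp [hk]
    have hres := ih o' t' (fun k => f k + (if j.testBit k then 1 else 0)) ho' ht'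
    refine ⟨fun k => ?_, fun k => ?_⟩
    · rw [hres.1 k, bitcnt_cons, ← Nat.add_assoc]
    · rw [hres.2 k, bitcnt_cons, ← Nat.add_assoc]

theorem B_tb (arr : List Int) (k : Nat) :
    (find_once_alt arr).testBit k = (decide (k < 32) && decide (bitcnt arr k % 3 ≠ 0)) := by
  unfold find_once_alt
  have h := B_fold arr 0 0 (fun _ => 0) (fun k => by simp [zero_tb]) (fun k => by simp [zero_tb])
  simp only [Nat.zero_add] at h
  rw [bor_tb, h.1 k, h.2 k]
  by_cases hk : k < 32
  · simp only [hk, decide_true, Bool.true_and]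
    rcases (by omega : bitcnt arr k % 3 = 0 ∨ bitcnt arr k % 3 = 1 ∨ bitcnt arr k % 3 = 2) with h | h | h <;> simp [h]
  · simp [hk]

-- ===== VERDICT =====
theorem find_once_spec : Claim_equal_find_once := by
  intro arr _
  unfold Spec_find_once
  exact intExt fun k => by rw [A_tb, B_tb]
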